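-- pv_equiv track=rewrite | github.com/guojianryan/IGCSE_CS | codewars/twice_linear.py | dbl_linear
-- ===== SOURCE A (Python) =====
-- import bisect
--
-- def binary_search(a, x, lo=0, hi=None):  # can't use a to specify default for hi
--     hi = hi if hi is not None else len(a)  # hi defaults to len(a)
--     pos = bisect.bisect_left(a, x, lo, hi)  # find insertion position
--     return (pos if pos != hi and a[pos] == x else -1)  # don't walk off the end
--
-- def dbl_linear(n):
--     seq = [1]
--     for i in range(0, n):
--         x2 = seq[0] * 2 + 1
--
--         if binary_search(seq, x2) == -1:
--             bisect.insort_left(seq, x2)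
--
--         x3 = seq[0] * 3 + 1
--         if binary_search(seq, x3) == -1:
--             bisect.insort_left(seq, x3)
--
--         seq.pop(0)
--
--     return seq[0]
-- ===== SOURCE B (Python) =====
-- def dbl_linear(n):
--     # two-pointer merge of the 2u+1 and 3u+1 streams (ugly-number style), O(n)
--     u = [1]
--     x = y = 0
--     for _ in range(n):
--         a = 2 * u[x] + 1
--         b = 3 * u[y] + 1
--         v = min(a, b)
--         u.append(v)
--         if v == a:
--             x += 1
--         if v == b:
--             y += 1
--     return u[-1]
-- ===== Notes on version B (the rewrite author's own statement) =====
-- stated objective: faster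
-- what changed: Replaces the sorted working set with repeated bisect-insert and pop(0) by a two-pointer merge of the 2u+1 and 3u+1 streams (ugly-number style), appending each term once.
import Mathlib
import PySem

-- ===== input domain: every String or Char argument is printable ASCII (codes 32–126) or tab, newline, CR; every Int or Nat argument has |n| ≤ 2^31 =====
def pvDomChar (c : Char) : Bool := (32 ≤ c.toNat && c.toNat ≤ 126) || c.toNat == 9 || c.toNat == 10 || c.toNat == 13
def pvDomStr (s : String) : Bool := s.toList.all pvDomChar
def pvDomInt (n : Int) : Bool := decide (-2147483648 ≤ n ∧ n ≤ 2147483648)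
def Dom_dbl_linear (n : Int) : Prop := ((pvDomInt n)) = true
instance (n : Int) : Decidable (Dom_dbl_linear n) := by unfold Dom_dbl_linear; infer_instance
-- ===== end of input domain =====

-- B replaces A's sorted working set (bisect-insert + pop(0) each round) by an O(n)
-- two-pointer merge of the 2u+1 and 3u+1 streams (ugly-number style).

-- ===== PORT A =====
-- bisect.bisect_left(a, x, lo, hi) ported via PySem.List.bisectLeft on the selected
-- segment (exact for the 0 ≤ lo ≤ hi ≤ len(a) calls made in this module)
def binary_search (a : List Int) (x : Int) (lo : Int) (hi : Option Int) : Int :=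
  let hi := match hi with | some h => h | none => PySem.List.len a   -- hi defaults to len(a)
  let pos : Int := lo + ((PySem.List.bisectLeft ((a.drop lo.toNat).take (hi - lo).toNat) x : Nat) : Int)
  -- a[pos] is only read under pos ≠ hi, where 0 ≤ pos < len a, so pyGetD is exact
  if pos ≠ hi ∧ PySem.List.pyGetD a pos 0 = x then pos else -1

-- bisect.insort_left(a, x): insert x at position bisect_left(a, x)
def pyInsortLeft (a : List Int) (x : Int) : List Int :=
  a.insertIdx (PySem.List.bisectLeft a x) x

-- body of A's for-loop (seq is never empty, so seq[0] = pyGetD seq 0 0 is exact)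
def dblStepA (seq : List Int) : List Int :=
  let x2 := PySem.List.pyGetD seq 0 0 * 2 + 1
  let seq := if binary_search seq x2 0 none = -1 then pyInsortLeft seq x2 else seq
  let x3 := PySem.List.pyGetD seq 0 0 * 3 + 1
  let seq := if binary_search seq x3 0 none = -1 then pyInsortLeft seq x3 else seq
  seq.drop 1   -- seq.pop(0)

def dbl_linear (n : Int) : Int :=
  let seq := (PySem.List.pyRange 0 n 1).foldl (fun seq _ => dblStepA seq) [1]
  PySem.List.pyGetD seq 0 0

-- ===== PORT B =====
-- body of B's for-loop over the state (u, x, y); x, y are list indices, always in range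
def dblStepB (st : List Int × Nat × Nat) : List Int × Nat × Nat :=
  let u := st.1
  let x := st.2.1
  let y := st.2.2
  let a := 2 * PySem.List.pyGetD u (x : Int) 0 + 1
  let b := 3 * PySem.List.pyGetD u (y : Int) 0 + 1
  let v := min a b
  (u ++ [v], if v = a then x + 1 else x, if v = b then y + 1 else y)

def dbl_linear_alt (n : Int) : Int :=
  let st := (PySem.List.pyRange 0 n 1).foldl (fun st _ => dblStepB st) ([1], 0, 0)
  PySem.List.pyGetD st.1 (-1) 0   -- u[-1]

-- ===== PRECONDITION & SPEC =====
def Spec_dbl_linear (n : Int) (out : Int) : Prop := out = dbl_linear_alt n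
instance (n : Int) (out : Int) : Decidable (Spec_dbl_linear n out) := by unfold Spec_dbl_linear; infer_instance

-- ===== CLAIM (what is proved, stated in full; the proofs are below) =====
def Claim_equal_dbl_linear : Prop := ∀ (n : Int), Dom_dbl_linear n → Spec_dbl_linear n (dbl_linear n)

-- ===== LEMMAS AND PROOFS =====

-- merge of two strictly increasing lists, deduplicating across the two
def mrg : List Int → List Int → List Int
  | [], b => b
  | a :: as, [] => a :: as
  | a :: as, b :: bs =>
    if a < b then a :: mrg as (b :: bs)
    else if b < a then b :: mrg (a :: as) bs
    else a :: mrg as bs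
termination_by a b => a.length + b.length

-- sorted insert (at the bisect_left position) and conditional insert
def sins (s : List Int) (z : Int) : List Int :=
  s.takeWhile (fun v => decide (v < z)) ++ z :: s.dropWhile (fun v => decide (v < z))

def cins (s : List Int) (z : Int) : List Int := if z ∈ s then s else sins s z

-- the bridge invariant: A's working set seq, written in terms of B's state (u, x, y)
def BInv (seq u : List Int) (x y : Nat) : Prop :=
  u ≠ [] ∧ u.Pairwise (· < ·) ∧ 0 < u.getLastD 0 ∧
  x + 1 ≤ u.length ∧ y + 1 ≤ u.length ∧
  (∀ a ∈ u.drop x, u.getLastD 0 < 2 * a + 1) ∧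
  (∀ a ∈ u.drop y, u.getLastD 0 < 3 * a + 1) ∧
  seq = u.getLastD 0 ::
    mrg ((u.dropLast.drop x).map (fun a => 2 * a + 1))
        ((u.dropLast.drop y).map (fun a => 3 * a + 1))

-- ---- generic list facts ----

lemma insertIdx_len {α : Type} (l1 l2 : List α) (z : α) :
    (l1 ++ l2).insertIdx l1.length z = l1 ++ z :: l2 := by
  induction l1 with
  | nil => simp
  | cons a t ih => simp [ih]

lemma pred_of_lt_len_takeWhile {α : Type} (p : α → Bool) (l : List α) (i : Nat)
    (h : i < (l.takeWhile p).length) (hl : i < l.length) : p (l[i]'hl) = true := by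
  induction l generalizing i with
  | nil => simp at hl
  | cons a t ih =>
    by_cases hp : p a
    · cases i with
      | zero => simp [hp]
      | succ j =>
        have hlen : (List.takeWhile p (a :: t)).length = (List.takeWhile p t).length + 1 := by
          simp [hp]
        rw [hlen] at h
        simpa using ih j (by omega) (by simpa using hl)
    · simp [hp] at h

lemma not_pred_at_len_takeWhile {α : Type} (p : α → Bool) (l : List α)
    (h : (l.takeWhile p).length < l.length) : ¬ p (l[(l.takeWhile p).length]'h) = true := by
  induction l with
  | nil => simp at h
  | cons a t ih =>
    by_cases hp : p a
    · have hlen : (List.takeWhile p (a :: t)).length = (List.takeWhile p t).length + 1 := by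
        simp [hp]
      have h' : (List.takeWhile p t).length < t.length := by
        simp [hlen] at h; omega
      have := ih h'
      simpa [hlen] using this
    · simp [hp]

lemma getLastD_eq_getLast (u : List Int) (h : u ≠ []) : u.getLastD 0 = u.getLast h := by
  rw [List.getLastD_eq_getLast?, List.getLast?_eq_some_getLast h]; rfl

lemma dropLast_append_getLastD (u : List Int) (h : u ≠ []) :
    u.dropLast ++ [u.getLastD 0] = u := by
  rw [getLastD_eq_getLast u h, List.dropLast_append_getLast]

lemma mem_dropLast_lt_last (u : List Int) (hne : u ≠ []) (hpw : u.Pairwise (· < ·)) :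
    ∀ a ∈ u.dropLast, a < u.getLastD 0 := by
  intro a ha
  have := dropLast_append_getLastD u hne
  have hpw' : (u.dropLast ++ [u.getLastD 0]).Pairwise (· < ·) := by rw [this]; exact hpw
  exact (List.pairwise_append.mp hpw').2.2 a ha _ (by simp)

lemma mem_le_last (u : List Int) (hne : u ≠ []) (hpw : u.Pairwise (· < ·)) :
    ∀ a ∈ u, a ≤ u.getLastD 0 := by
  intro a ha
  have h2 : a ∈ u.dropLast ++ [u.getLastD 0] := by
    rw [dropLast_append_getLastD u hne]; exact ha
  rcases List.mem_append.mp h2 with h1 | h1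
  · exact le_of_lt (mem_dropLast_lt_last u hne hpw a h1)
  · simp only [List.mem_singleton] at h1; omega

lemma drop_eq_getD_cons (u : List Int) (x : Nat) (hx : x < u.length) :
    u.drop x = u.getD x 0 :: u.drop (x + 1) := by
  rw [List.getD_eq_getElem u 0 hx]
  exact List.drop_eq_getElem_cons hx

lemma lt_of_mem_drop_succ (u : List Int) (x : Nat) (hx : x < u.length)
    (hpw : u.Pairwise (· < ·)) : ∀ a ∈ u.drop (x + 1), u.getD x 0 < a := by
  have h1 : (u.drop x).Pairwise (· < ·) := List.Pairwise.sublist (List.drop_sublist x u) hpw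
  rw [drop_eq_getD_cons u x hx] at h1
  exact (List.pairwise_cons.mp h1).1

-- ---- bisect / insort on a strictly sorted list ----

lemma bisect_eq_takeWhile (s : List Int) (z : Int) (h : s.Pairwise (· < ·)) :
    PySem.List.bisectLeft s z = (s.takeWhile (fun v => decide (v < z))).length := by
  obtain ⟨hle, hlt, hge⟩ := PySem.List.bisectLeft_spec s z (h.imp le_of_lt)
  have hm_le : (s.takeWhile (fun v => decide (v < z))).length ≤ s.length :=
    (List.takeWhile_sublist _).length_le
  rcases Nat.lt_trichotomy (PySem.List.bisectLeft s z)
      (s.takeWhile (fun v => decide (v < z))).length with hc | hc | hc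
  · exfalso
    have hplen : PySem.List.bisectLeft s z < s.length := lt_of_lt_of_le hc hm_le
    have h1 : z ≤ s[PySem.List.bisectLeft s z] := hge _ hplen le_rfl
    have h3 := pred_of_lt_len_takeWhile (fun v => decide (v < z)) s _ hc hplen
    simp at h3; omega
  · exact hc
  · exfalso
    have hmlen : (s.takeWhile (fun v => decide (v < z))).length < s.length :=
      lt_of_lt_of_le hc hle
    have h1 : s[(s.takeWhile (fun v => decide (v < z))).length] < z := hlt _ hmlen hc
    have h2 := not_pred_at_len_takeWhile (fun v => decide (v < z)) s hmlen
    simp at h2; omega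

lemma bs_default (s : List Int) (z : Int) :
    binary_search s z 0 none =
      (if (PySem.List.bisectLeft s z : Int) ≠ (s.length : Int) ∧
          PySem.List.pyGetD s (PySem.List.bisectLeft s z) 0 = z
       then (PySem.List.bisectLeft s z : Int) else -1) := by
  simp [binary_search, PySem.List.len_eq]

lemma bs_neg_one_iff (s : List Int) (z : Int) (h : s.Pairwise (· < ·)) :
    binary_search s z 0 none = -1 ↔ z ∉ s := by
  obtain ⟨hle, hlt, hge⟩ := PySem.List.bisectLeft_spec s z (h.imp le_of_lt)
  rw [bs_default]
  constructor
  · intro hbs hz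
    obtain ⟨j, hj, hjz⟩ := List.getElem_of_mem hz
    have hjge : PySem.List.bisectLeft s z ≤ j := by
      by_contra hc
      have := hlt j hj (by omega)
      omega
    have hplen : PySem.List.bisectLeft s z < s.length := lt_of_le_of_lt hjge hj
    have h1 : z ≤ s[PySem.List.bisectLeft s z] := hge _ hplen le_rfl
    have h2 : s[PySem.List.bisectLeft s z] ≤ z := by
      rcases Nat.lt_or_ge (PySem.List.bisectLeft s z) j with hcase | hcase
      · have := List.pairwise_iff_getElem.mp (h.imp le_of_lt) _ _ hplen hj hcase
        omega
      · have : PySem.List.bisectLeft s z = j := by omega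
        subst this; omega
    have heq : s[PySem.List.bisectLeft s z] = z := le_antisymm h2 h1
    rw [if_pos] at hbs
    · omega
    · constructor
      · intro hc; have : PySem.List.bisectLeft s z = s.length := by exact_mod_cast hc
        omega
      · rw [PySem.List.pyGetD_natCast, List.getD_eq_getElem s 0 hplen]; exact heq
  · intro hz
    rw [if_neg]
    rintro ⟨hne, hget⟩
    have hplen : PySem.List.bisectLeft s z < s.length := by
      rcases Nat.lt_or_ge (PySem.List.bisectLeft s z) s.length with hc | hc
      · exact hc
      · exfalso; apply hne
        have : PySem.List.bisectLeft s z = s.length := by omega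
        exact_mod_cast congrArg (Nat.cast : Nat → Int) this
    rw [PySem.List.pyGetD_natCast, List.getD_eq_getElem s 0 hplen] at hget
    exact hz (hget ▸ List.getElem_mem hplen)

lemma insort_eq_sins (s : List Int) (z : Int) (h : s.Pairwise (· < ·)) :
    pyInsortLeft s z = sins s z := by
  unfold pyInsortLeft sins
  rw [bisect_eq_takeWhile s z h]
  have h3 := insertIdx_len (s.takeWhile (fun v => decide (v < z)))
    (s.dropWhile (fun v => decide (v < z))) z
  rw [List.takeWhile_append_dropWhile] at h3
  exact h3

lemma cond_ins (s : List Int) (z : Int) (h : s.Pairwise (· < ·)) :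
    (if binary_search s z 0 none = -1 then pyInsortLeft s z else s) = cins s z := by
  by_cases hz : z ∈ s
  · rw [if_neg, cins, if_pos hz]
    rw [bs_neg_one_iff s z h]; simp [hz]
  · rw [if_pos, cins, if_neg hz, insort_eq_sins s z h]
    rw [bs_neg_one_iff s z h]; exact hz

-- ---- mrg and cins facts ----

lemma mrg_nil_right (s : List Int) : mrg s [] = s := by
  cases s <;> simp [mrg]

lemma mem_mrg (w : Int) (s t : List Int) : w ∈ mrg s t ↔ w ∈ s ∨ w ∈ t := by
  fun_induction mrg s t with
  | case1 b => simp
  | case2 a as => simp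
  | case3 a as b bs hab ih => simp [ih]; tauto
  | case4 a as b bs hab hba ih => simp [ih]; tauto
  | case5 a as b bs hab hba ih =>
    have : a = b := by omega
    subst this
    simp [ih]; tauto

lemma pairwise_mrg (s t : List Int) :
    s.Pairwise (· < ·) → t.Pairwise (· < ·) → (mrg s t).Pairwise (· < ·) := by
  fun_induction mrg s t with
  | case1 b => intro _ ht; exact ht
  | case2 a as => intro hs _; exact hs
  | case3 a as b bs hab ih =>
    intro hs ht
    rw [List.pairwise_cons] at hs ⊢
    refine ⟨?_, ih hs.2 ht⟩
    intro w hw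
    rcases (mem_mrg w as (b :: bs)).mp hw with h1 | h1
    · exact hs.1 w h1
    · rcases List.mem_cons.mp h1 with h2 | h2
      · omega
      · have := (List.pairwise_cons.mp ht).1 w h2; omega
  | case4 a as b bs hab hba ih =>
    intro hs ht
    rw [List.pairwise_cons] at ht ⊢
    refine ⟨?_, ih hs ht.2⟩
    intro w hw
    rcases (mem_mrg w (a :: as) bs).mp hw with h1 | h1
    · rcases List.mem_cons.mp h1 with h2 | h2
      · omega
      · have := (List.pairwise_cons.mp hs).1 w h2; omega
    · exact ht.1 w h1
  | case5 a as b bs hab hba ih =>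
    intro hs ht
    rw [List.pairwise_cons] at hs ht ⊢
    refine ⟨?_, ih hs.2 ht.2⟩
    intro w hw
    rcases (mem_mrg w as bs).mp hw with h1 | h1
    · exact hs.1 w h1
    · have := ht.1 w h1; omega

lemma sins_append (s : List Int) (z : Int) (h : ∀ a ∈ s, a < z) : sins s z = s ++ [z] := by
  unfold sins
  have h1 : s.takeWhile (fun v => decide (v < z)) = s :=
    List.takeWhile_eq_self_iff.mpr (by intro a ha; simpa using h a ha)
  have h2 : s.dropWhile (fun v => decide (v < z)) = [] :=
    List.dropWhile_eq_nil_iff.mpr (by intro a ha; simpa using h a ha)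
  rw [h1, h2]

lemma cins_big (s : List Int) (z : Int) (h : ∀ a ∈ s, a < z) : cins s z = s ++ [z] := by
  rw [cins, if_neg, sins_append s z h]
  intro hc; have := h z hc; omega

lemma cins_cons_of_lt (h : Int) (t : List Int) (z : Int) (hlt : h < z) :
    cins (h :: t) z = h :: cins t z := by
  unfold cins
  have hne : z ≠ h := by omega
  by_cases hz : z ∈ t
  · simp [hz, hne]
  · have : z ∉ h :: t := by simp [hne, hz]
    rw [if_neg this, if_neg hz]
    unfold sins
    simp [hlt]

lemma cins_eq_mrg_singleton (t : List Int) (z : Int) (ht : t.Pairwise (· < ·)) :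
    cins t z = mrg [z] t := by
  induction t with
  | nil => simp [cins, sins, mrg]
  | cons b bs ih =>
    rw [List.pairwise_cons] at ht
    rcases lt_trichotomy z b with hc | hc | hc
    · have hznot : z ∉ b :: bs := by
        simp only [List.mem_cons]
        rintro (h1 | h1)
        · omega
        · have := ht.1 z h1; omega
      rw [cins, if_neg hznot]
      unfold sins
      have hb : ¬ (b < z) := by omega
      simp [mrg, hb, hc]
    · subst hc
      rw [cins, if_pos (by simp)]
      simp [mrg]
    · rw [cins_cons_of_lt b bs z hc, ih ht.2]
      simp [mrg, hc, not_lt_of_gt hc]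

lemma cins_mrg_left (s t : List Int) (z : Int) :
    s.Pairwise (· < ·) → t.Pairwise (· < ·) → (∀ a ∈ s, a < z) →
    cins (mrg s t) z = mrg (s ++ [z]) t := by
  fun_induction mrg s t with
  | case1 b => intro _ ht _; exact cins_eq_mrg_singleton b z ht
  | case2 a as =>
    intro hs _ hz
    rw [mrg_nil_right, cins_big _ z hz]
  | case3 a as b bs hab ih =>
    intro hs ht hz
    have haz : a < z := hz a (by simp)
    rw [cins_cons_of_lt _ _ _ haz,
      ih (List.pairwise_cons.mp hs).2 ht (fun w hw => hz w (by simp [hw]))]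
    have : (a :: as) ++ [z] = a :: (as ++ [z]) := by simp
    rw [this]
    simp [mrg, hab]
  | case4 a as b bs hab hba ih =>
    intro hs ht hz
    have haz : a < z := hz a (by simp)
    have hbz : b < z := by omega
    rw [cins_cons_of_lt _ _ _ hbz, ih hs (List.pairwise_cons.mp ht).2 hz]
    have : (a :: as) ++ [z] = a :: (as ++ [z]) := by simp
    rw [this]
    simp [mrg, hab, hba]
  | case5 a as b bs hab hba ih =>
    intro hs ht hz
    have haz : a < z := hz a (by simp)
    rw [cins_cons_of_lt _ _ _ haz,
      ih (List.pairwise_cons.mp hs).2 (List.pairwise_cons.mp ht).2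
        (fun w hw => hz w (by simp [hw]))]
    have : (a :: as) ++ [z] = a :: (as ++ [z]) := by simp
    rw [this]
    simp [mrg, hab, hba]

lemma mrg_big_singleton (s : List Int) (z : Int) (h : ∀ a ∈ s, a < z) :
    mrg s [z] = s ++ [z] := by
  induction s with
  | nil => simp [mrg]
  | cons a as ih =>
    have haz : a < z := h a (by simp)
    simp only [mrg, if_pos haz]
    rw [ih (fun w hw => h w (by simp [hw]))]
    simp

lemma mrg_append_big (s t : List Int) (z : Int) :
    (∀ a ∈ s, a < z) → (∀ b ∈ t, b < z) → mrg s (t ++ [z]) = mrg s t ++ [z] := by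
  fun_induction mrg s t with
  | case1 b => intro _ _; simp [mrg]
  | case2 a as => intro hs _; simp [mrg_big_singleton _ z hs]
  | case3 a as b bs hab ih =>
    intro hs ht
    have : (b :: bs) ++ [z] = b :: (bs ++ [z]) := by simp
    rw [this]
    simp only [mrg, if_pos hab]
    rw [← this, ih (fun w hw => hs w (by simp [hw])) ht]
    simp
  | case4 a as b bs hab hba ih =>
    intro hs ht
    have : (b :: bs) ++ [z] = b :: (bs ++ [z]) := by simp
    rw [this]
    simp only [mrg, if_neg hab, if_pos hba]
    rw [ih hs (fun w hw => ht w (by simp [hw]))]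
    simp
  | case5 a as b bs hab hba ih =>
    intro hs ht
    have : (b :: bs) ++ [z] = b :: (bs ++ [z]) := by simp
    rw [this]
    simp only [mrg, if_neg hab, if_neg hba]
    rw [ih (fun w hw => hs w (by simp [hw])) (fun w hw => ht w (by simp [hw]))]
    simp

lemma cins_mrg_right (s t : List Int) (z : Int)
    (hs : ∀ a ∈ s, a < z) (ht : ∀ b ∈ t, b < z) :
    cins (mrg s t) z = mrg s (t ++ [z]) := by
  rw [cins_big (mrg s t) z
    (by intro w hw; rcases (mem_mrg w s t).mp hw with h | h
        · exact hs w h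
        · exact ht w h)]
  rw [mrg_append_big s t z hs ht]

-- ---- the step lemma ----

lemma step_inv (seq : List Int) (st : List Int × Nat × Nat)
    (h : BInv seq st.1 st.2.1 st.2.2) :
    BInv (dblStepA seq) (dblStepB st).1 (dblStepB st).2.1 (dblStepB st).2.2 := by
  obtain ⟨u, x, y⟩ := st
  obtain ⟨hne, hpw, hpos, hx, hy, hcx, hcy, hseq⟩ := h
  simp only at hx hy hcx hcy hseq ⊢
  set m := u.getLastD 0 with hm
  set L2 := (u.dropLast.drop x).map (fun a => 2 * a + 1) with hL2
  set L3 := (u.dropLast.drop y).map (fun a => 3 * a + 1) with hL3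
  have hxlen : x < u.length := by omega
  have hylen : y < u.length := by omega
  have hD1x : u.drop x = u.dropLast.drop x ++ [m] := by
    rw [← List.drop_append_of_le_length (by simp [List.length_dropLast]; omega),
      dropLast_append_getLastD u hne]
  have hD1y : u.drop y = u.dropLast.drop y ++ [m] := by
    rw [← List.drop_append_of_le_length (by simp [List.length_dropLast]; omega),
      dropLast_append_getLastD u hne]
  -- elements of L2 / L3 come from u.dropLast, hence are generated from values < m
  have hL2elt : ∀ w ∈ L2, ∃ c, c ∈ u.drop x ∧ c < m ∧ w = 2 * c + 1 := by
    intro w hw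
    obtain ⟨c, hc, hcw⟩ := List.mem_map.mp hw
    exact ⟨c, by rw [hD1x]; exact List.mem_append_left _ hc,
      mem_dropLast_lt_last u hne hpw c (List.mem_of_mem_drop hc), hcw.symm⟩
  have hL3elt : ∀ w ∈ L3, ∃ c, c ∈ u.drop y ∧ c < m ∧ w = 3 * c + 1 := by
    intro w hw
    obtain ⟨c, hc, hcw⟩ := List.mem_map.mp hw
    exact ⟨c, by rw [hD1y]; exact List.mem_append_left _ hc,
      mem_dropLast_lt_last u hne hpw c (List.mem_of_mem_drop hc), hcw.symm⟩
  have hmL2 : ∀ w ∈ L2, m < w := by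
    intro w hw; obtain ⟨c, hc, _, hcw⟩ := hL2elt w hw; have := hcx c hc; omega
  have hmL3 : ∀ w ∈ L3, m < w := by
    intro w hw; obtain ⟨c, hc, _, hcw⟩ := hL3elt w hw; have := hcy c hc; omega
  have hpwL2 : L2.Pairwise (· < ·) := by
    rw [hL2, List.pairwise_map]
    exact (List.Pairwise.sublist ((List.drop_sublist x _).trans (List.dropLast_sublist u)) hpw).imp
      (by intro a b hab; omega)
  have hpwL3 : L3.Pairwise (· < ·) := by
    rw [hL3, List.pairwise_map]
    exact (List.Pairwise.sublist ((List.drop_sublist y _).trans (List.dropLast_sublist u)) hpw).imp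
      (by intro a b hab; omega)
  have hpwseq : seq.Pairwise (· < ·) := by
    rw [hseq, List.pairwise_cons]
    refine ⟨?_, pairwise_mrg _ _ hpwL2 hpwL3⟩
    intro w hw
    rcases (mem_mrg w L2 L3).mp hw with h1 | h1
    · exact hmL2 w h1
    · exact hmL3 w h1
  -- A's step, rewritten to a merge of the two extended streams
  have hhead : PySem.List.pyGetD seq 0 0 = m := by
    rw [hseq, PySem.List.pyGetD_zero]; simp
  have e1 : (if binary_search seq (PySem.List.pyGetD seq 0 0 * 2 + 1) 0 none = -1
      then pyInsortLeft seq (PySem.List.pyGetD seq 0 0 * 2 + 1) else seq)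
      = m :: mrg (L2 ++ [m * 2 + 1]) L3 := by
    rw [hhead, cond_ins seq (m * 2 + 1) hpwseq, hseq,
      cins_cons_of_lt _ _ _ (by omega),
      cins_mrg_left L2 L3 (m * 2 + 1) hpwL2 hpwL3
        (by intro w hw; obtain ⟨c, _, hcm, hcw⟩ := hL2elt w hw; omega)]
  have hpwseq1 : (m :: mrg (L2 ++ [m * 2 + 1]) L3).Pairwise (· < ·) := by
    rw [List.pairwise_cons]
    constructor
    · intro w hw
      rcases (mem_mrg w (L2 ++ [m * 2 + 1]) L3).mp hw with h1 | h1
      · rcases List.mem_append.mp h1 with h2 | h2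
        · exact hmL2 w h2
        · simp at h2; omega
      · exact hmL3 w h1
    · refine pairwise_mrg _ _ ?_ hpwL3
      rw [List.pairwise_append]
      refine ⟨hpwL2, by simp, ?_⟩
      intro w hw b hb
      simp at hb; subst hb
      obtain ⟨c, _, hcm, hcw⟩ := hL2elt w hw; omega
  have e2 : dblStepA seq = mrg (L2 ++ [m * 2 + 1]) (L3 ++ [m * 3 + 1]) := by
    unfold dblStepA
    simp only [e1]
    have hhead1 : PySem.List.pyGetD (m :: mrg (L2 ++ [m * 2 + 1]) L3) 0 0 = m := by
      rw [PySem.List.pyGetD_zero]; simp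
    rw [hhead1, cond_ins _ (m * 3 + 1) hpwseq1,
      cins_cons_of_lt _ _ _ (by omega),
      cins_mrg_right (L2 ++ [m * 2 + 1]) L3 (m * 3 + 1)
        (by intro w hw
            rcases List.mem_append.mp hw with h2 | h2
            · obtain ⟨c, _, hcm, hcw⟩ := hL2elt w h2; omega
            · simp at h2; omega)
        (by intro w hw; obtain ⟨c, _, hcm, hcw⟩ := hL3elt w hw; omega)]
    simp
  have eL2full : L2 ++ [m * 2 + 1] = (u.drop x).map (fun a => 2 * a + 1) := by
    rw [hD1x, List.map_append]; simp [hL2]; ring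
  have eL3full : L3 ++ [m * 3 + 1] = (u.drop y).map (fun a => 3 * a + 1) := by
    rw [hD1y, List.map_append]; simp [hL3]; ring
  -- B's step
  set gx := u.getD x 0 with hgx
  set gy := u.getD y 0 with hgy
  have hstB : dblStepB (u, x, y) =
      (u ++ [min (2 * gx + 1) (3 * gy + 1)],
       if min (2 * gx + 1) (3 * gy + 1) = 2 * gx + 1 then x + 1 else x,
       if min (2 * gx + 1) (3 * gy + 1) = 3 * gy + 1 then y + 1 else y) := by
    simp only [dblStepB, PySem.List.pyGetD_natCast, hgx, hgy]
  set v := min (2 * gx + 1) (3 * gy + 1) with hv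
  have hDx : u.drop x = gx :: u.drop (x + 1) := drop_eq_getD_cons u x hxlen
  have hDy : u.drop y = gy :: u.drop (y + 1) := drop_eq_getD_cons u y hylen
  have hgxm : m < 2 * gx + 1 := hcx gx (by rw [hDx]; simp)
  have hgym : m < 3 * gy + 1 := hcy gy (by rw [hDy]; simp)
  have hmv : m < v := lt_min hgxm hgym
  have hvpos : 0 < v := by omega
  have hle2 : ∀ a ∈ u.drop x, gx ≤ a := by
    intro a ha
    rw [hDx] at ha
    rcases List.mem_cons.mp ha with h1 | h1
    · omega
    · have := lt_of_mem_drop_succ u x hxlen hpw a h1; omega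
  have hle3 : ∀ a ∈ u.drop y, gy ≤ a := by
    intro a ha
    rw [hDy] at ha
    rcases List.mem_cons.mp ha with h1 | h1
    · omega
    · have := lt_of_mem_drop_succ u y hylen hpw a h1; omega
  have hallmem : ∀ a ∈ u, a ≤ m := mem_le_last u hne hpw
  have hpwu' : (u ++ [v]).Pairwise (· < ·) := by
    rw [List.pairwise_append]
    exact ⟨hpw, by simp, by intro a ha b hb; simp at hb; subst hb
                            have := hallmem a ha; omega⟩
  have hlast' : (u ++ [v]).getLastD 0 = v := List.getLastD_concat
  have hdl' : (u ++ [v]).dropLast = u := List.dropLast_concat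
  have hlen' : (u ++ [v]).length = u.length + 1 := by simp
  -- new x-side condition (for whichever pointer value)
  have hcondx1 : v = 2 * gx + 1 → ∀ a ∈ (u ++ [v]).drop (x + 1), v < 2 * a + 1 := by
    intro hveq a ha
    rw [List.drop_append_of_le_length (by omega)] at ha
    rcases List.mem_append.mp ha with h1 | h1
    · have := lt_of_mem_drop_succ u x hxlen hpw a h1; omega
    · simp at h1; omega
  have hcondx0 : v < 2 * gx + 1 → ∀ a ∈ (u ++ [v]).drop x, v < 2 * a + 1 := by
    intro hvlt a ha
    rw [List.drop_append_of_le_length (by omega)] at ha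
    rcases List.mem_append.mp ha with h1 | h1
    · have := hle2 a h1; omega
    · simp at h1; omega
  have hcondy1 : v = 3 * gy + 1 → ∀ a ∈ (u ++ [v]).drop (y + 1), v < 3 * a + 1 := by
    intro hveq a ha
    rw [List.drop_append_of_le_length (by omega)] at ha
    rcases List.mem_append.mp ha with h1 | h1
    · have := lt_of_mem_drop_succ u y hylen hpw a h1; omega
    · simp at h1; omega
  have hcondy0 : v < 3 * gy + 1 → ∀ a ∈ (u ++ [v]).drop y, v < 3 * a + 1 := by
    intro hvlt a ha
    rw [List.drop_append_of_le_length (by omega)] at ha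
    rcases List.mem_append.mp ha with h1 | h1
    · have := hle3 a h1; omega
    · simp at h1; omega
  rw [hstB]
  rcases lt_trichotomy (2 * gx + 1) (3 * gy + 1) with hc | hc | hc
  · -- the 2-stream supplies the next element
    have hveq : v = 2 * gx + 1 := min_eq_left (by omega)
    have hvne : v ≠ 3 * gy + 1 := by omega
    refine ⟨by simp, hpwu', by rw [hlast']; omega, ?_, ?_, ?_, ?_, ?_⟩
    · simp [hveq]; omega
    · simp [hvne]; omega
    · rw [hlast']; simp only [if_pos hveq]; exact hcondx1 hveq
    · rw [hlast']; simp only [if_neg hvne]; exact hcondy0 (by omega)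
    · rw [hlast', hdl', e2, eL2full, eL3full]
      simp only [if_pos hveq, if_neg hvne]
      rw [hDx, hDy, List.map_cons, List.map_cons]
      show mrg _ _ = v :: mrg ((u.drop (x+1)).map (fun a => 2 * a + 1))
        (((gy :: u.drop (y+1)).map (fun a => 3 * a + 1)))
      rw [List.map_cons]
      simp [mrg, hc, hveq]
  · -- both streams supply it (deduplicated)
    have hveq : v = 2 * gx + 1 := min_eq_left (by omega)
    have hveq' : v = 3 * gy + 1 := by omega
    refine ⟨by simp, hpwu', by rw [hlast']; omega, ?_, ?_, ?_, ?_, ?_⟩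
    · simp [hveq]; omega
    · simp [hveq']; omega
    · rw [hlast']; simp only [if_pos hveq]; exact hcondx1 hveq
    · rw [hlast']; simp only [if_pos hveq']; exact hcondy1 hveq'
    · rw [hlast', hdl', e2, eL2full, eL3full]
      simp only [if_pos hveq, if_pos hveq']
      rw [hDx, hDy, List.map_cons, List.map_cons]
      simp [mrg, hc, hveq]
  · -- the 3-stream supplies the next element
    have hveq : v = 3 * gy + 1 := min_eq_right (by omega)
    have hvne : v ≠ 2 * gx + 1 := by omega
    refine ⟨by simp, hpwu', by rw [hlast']; omega, ?_, ?_, ?_, ?_, ?_⟩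
    · simp [hvne]; omega
    · simp [hveq]; omega
    · rw [hlast']; simp only [if_neg hvne]; exact hcondx0 (by omega)
    · rw [hlast']; simp only [if_pos hveq]; exact hcondy1 hveq
    · rw [hlast', hdl', e2, eL2full, eL3full]
      simp only [if_neg hvne, if_pos hveq]
      rw [hDx, hDy, List.map_cons, List.map_cons]
      simp [mrg, hc, not_lt_of_gt hc, hveq]

lemma fold_inv (l : List Int) :
    ∀ (seq : List Int) (st : List Int × Nat × Nat), BInv seq st.1 st.2.1 st.2.2 →
      BInv (l.foldl (fun s _ => dblStepA s) seq)
        (l.foldl (fun t _ => dblStepB t) st).1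
        (l.foldl (fun t _ => dblStepB t) st).2.1
        (l.foldl (fun t _ => dblStepB t) st).2.2 := by
  induction l with
  | nil => intro seq st h; simpa using h
  | cons a l ih =>
    intro seq st h
    simpa using ih (dblStepA seq) (dblStepB st) (step_inv seq st h)

lemma base_inv : BInv [1] [1] 0 0 := by
  unfold BInv
  refine ⟨by simp, by simp, by simp, by simp, by simp, ?_, ?_, ?_⟩
  · intro a ha; simp at ha; subst ha; simp
  · intro a ha; simp at ha; subst ha; simp
  · simp [mrg]

-- ===== VERDICT (by name: the statement is the Claim_ definition above) =====
theorem dbl_linear_spec : Claim_equal_dbl_linear := by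
  unfold Claim_equal_dbl_linear
  intro n _
  unfold Spec_dbl_linear dbl_linear dbl_linear_alt
  have h := fold_inv (PySem.List.pyRange 0 n 1) [1] ([1], 0, 0) base_inv
  obtain ⟨hne, _, _, _, _, _, _, hseq⟩ := h
  rw [hseq, PySem.List.pyGetD_zero]
  simp only [List.getD]
  have hlast : PySem.List.pyGetD
      ((PySem.List.pyRange 0 n 1).foldl (fun t _ => dblStepB t) ([1], 0, 0)).1 (-1) 0
      = ((PySem.List.pyRange 0 n 1).foldl (fun t _ => dblStepB t) ([1], 0, 0)).1.getLastD 0 := by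
    rw [PySem.List.pyGetD_neg_one _ _ hne, List.getLastD_eq_getLast?,
      List.getLast?_eq_some_getLast hne]
    simp
  rw [hlast]
  simp
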